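-- pv_equiv track=rewrite | github.com/hx343/myprogarm | Monoalphabetic Substitution Tool.py | evaluate_key_frequency
-- ===== SOURCE A (Python) =====
-- from collections import Counter
--
-- def evaluate_key_frequency(key, ciphertext):
--     """使用频率分析评估密钥的质量"""
--     # 解密文本
--     reverse_key = {v: k for k, v in key.items()}
--     decrypted_text = []
--     for c in ciphertext:
--         if c.isalpha():
--             if c.isupper():
--                 decrypted_text.append(reverse_key.get(c.lower(), '*').upper())
--             else:
--                 decrypted_text.append(reverse_key.get(c, '*'))
--         else:
--             decrypted_text.append(c)
--
--     decrypted_text_str = "".join(decrypted_text)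
--
--     # 计算解密文本的字母频率
--     freq = Counter(c.lower() for c in decrypted_text_str if c.isalpha())
--
--     # 英语字母频率顺序
--     english_freq_order = 'etaoinsrhdlucmfywgpbvkxqjz'
--
--     # 计算解密文本的字母频率顺序
--     decrypted_freq_order = ''.join([letter for letter, _ in freq.most_common()])
--
--     # 计算评分：频率顺序匹配程度
--     score = 0
--     for i, letter in enumerate(decrypted_freq_order):
--         if letter in english_freq_order:
--             pos = english_freq_order.index(letter)
--             # 位置越接近，得分越高
--             score += 10 - abs(i - pos) if i < 10 else 0
--
--     return score
-- ===== SOURCE B (Python) =====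
-- from collections import Counter
--
-- def evaluate_key_frequency(key, ciphertext):
--     """Count each cipher letter once, then distribute those counts onto the
--     decrypted letters, instead of building and re-scanning the decrypted text."""
--     reverse_key = {v: k for k, v in key.items()}
--     english_freq_order = 'etaoinsrhdlucmfywgpbvkxqjz'
--     # one pass: per-cipher-letter counts (case-folded), keys in first-appearance order
--     cnt = Counter(c.lower() for c in ciphertext if c.isalpha())
--     # distribute each cipher letter's count onto the letters of its decryption;
--     # '*' (unknown) is not a letter and is skipped
--     freq = {}
--     for l, n in cnt.items():
--         for ch in reverse_key.get(l, '*'):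
--             if ch.isalpha():
--                 d = ch.lower()
--                 freq[d] = freq.get(d, 0) + n
--     order = [letter for letter, _ in sorted(freq.items(), key=lambda kv: -kv[1])]
--     score = 0
--     for i, letter in enumerate(order[:10]):
--         if letter in english_freq_order:
--             score += 10 - abs(i - english_freq_order.index(letter))
--     return score
-- ===== Notes on version B (the rewrite author's own statement) =====
-- stated objective: alternative
-- what changed: B counts each cipher letter once with a Counter and distributes those counts through the reverse key onto the decrypted letters (preserving first-appearance tie order), instead of materialising the whole decrypted text and re-counting it character by character; scoring then runs only over the top-10 slice instead of the full frequency order with an i<10 guard.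
import Mathlib
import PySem

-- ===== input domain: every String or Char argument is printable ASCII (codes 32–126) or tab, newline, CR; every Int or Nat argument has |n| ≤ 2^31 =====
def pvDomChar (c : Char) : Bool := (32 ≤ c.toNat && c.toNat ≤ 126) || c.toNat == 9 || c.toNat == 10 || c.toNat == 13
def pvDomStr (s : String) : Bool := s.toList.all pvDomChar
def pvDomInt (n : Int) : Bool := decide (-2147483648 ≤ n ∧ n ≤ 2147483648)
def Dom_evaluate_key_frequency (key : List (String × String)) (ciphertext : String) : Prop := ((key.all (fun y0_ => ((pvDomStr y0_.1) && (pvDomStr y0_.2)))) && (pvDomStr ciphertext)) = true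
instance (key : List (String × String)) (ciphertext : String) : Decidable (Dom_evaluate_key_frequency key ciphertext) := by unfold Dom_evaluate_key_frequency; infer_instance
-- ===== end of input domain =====

-- B counts the ciphertext letters once and distributes those counts through the reverse key,
-- instead of building and re-scanning the whole decrypted text (same cost, different algorithm).

-- ===== PORT A =====
def evaluate_key_frequency (key : List (String × String)) (ciphertext : String) : Int :=
  let keyd := PySem.Dict.ofList key
  let reverse_key := keyd.items.foldl (fun d p => d.insert p.2 p.1) PySem.Dict.empty
  let decrypted : List String := ciphertext.toList.foldl (fun acc c =>
      if PySem.Chars.isalpha c then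
        if PySem.Chars.isupper c then
          acc ++ [PySem.Str.upper (reverse_key.getD (String.ofList [PySem.Chars.lowerChar c]) "*")]
        else
          acc ++ [reverse_key.getD (String.ofList [c]) "*"]
      else
        acc ++ [String.ofList [c]]) []
  let decrypted_text_str := PySem.Str.join "" decrypted
  let freq := PySem.Dict.counter
      ((decrypted_text_str.toList.filter (fun c => PySem.Chars.isalpha c)).map PySem.Chars.lowerChar)
  let english_freq_order := "etaoinsrhdlucmfywgpbvkxqjz"
  let decrypted_freq_order : List Char :=
      (PySem.List.sorted freq.items (fun p => p.2) true).map (fun p => p.1)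
  (PySem.List.enumerate decrypted_freq_order 0).foldl (fun score p =>
      if PySem.Str.isIn (String.ofList [p.2]) english_freq_order then
        score + (if p.1 < 10 then 10 - |p.1 - PySem.Str.find english_freq_order (String.ofList [p.2])| else 0)
      else score) 0

-- ===== PORT B =====
def evaluate_key_frequency_alt (key : List (String × String)) (ciphertext : String) : Int :=
  let keyd := PySem.Dict.ofList key
  let reverse_key := keyd.items.foldl (fun d p => d.insert p.2 p.1) PySem.Dict.empty
  let english_freq_order := "etaoinsrhdlucmfywgpbvkxqjz"
  let cnt := PySem.Dict.counter
      ((ciphertext.toList.filter (fun c => PySem.Chars.isalpha c)).map PySem.Chars.lowerChar)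
  let freq := cnt.items.foldl (fun d p =>
      ((reverse_key.getD (String.ofList [p.1]) "*").toList).foldl (fun d2 ch =>
        if PySem.Chars.isalpha ch then
          d2.insert (PySem.Chars.lowerChar ch) (d2.getD (PySem.Chars.lowerChar ch) 0 + p.2)
        else d2) d) PySem.Dict.empty
  let order : List Char := (PySem.List.sorted freq.items (fun p => -p.2) false).map (fun p => p.1)
  (PySem.List.enumerate (PySem.List.slice order none (some 10)) 0).foldl (fun score p =>
      if PySem.Str.isIn (String.ofList [p.2]) english_freq_order then
        score + (10 - |p.1 - PySem.Str.find english_freq_order (String.ofList [p.2])|)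
      else score) 0

-- ===== PRECONDITION & SPEC =====
def Spec_evaluate_key_frequency (key : List (String × String)) (ciphertext : String) (out : Int) : Prop := out = evaluate_key_frequency_alt key ciphertext
instance (key : List (String × String)) (ciphertext : String) (out : Int) : Decidable (Spec_evaluate_key_frequency key ciphertext out) := by unfold Spec_evaluate_key_frequency; infer_instance

-- ===== CLAIM (what is proved, stated in full; the proofs are below) =====
def Claim_equal_evaluate_key_frequency : Prop := ∀ (key : List (String × String)) (ciphertext : String), Dom_evaluate_key_frequency key ciphertext → Spec_evaluate_key_frequency key ciphertext (evaluate_key_frequency key ciphertext)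

-- ===== LEMMAS AND PROOFS =====

-- ---------- proof-only helpers ----------

-- the per-cipher-letter "decrypted letters" function: chars of the reverse-key image,
-- kept if alphabetic, case-folded
def pvG (rk : PySem.Dict String String) (l : Char) : List Char :=
  (((rk.getD (String.ofList [l]) "*").toList).filter (fun c => PySem.Chars.isalpha c)).map PySem.Chars.lowerChar

-- the case-folded alphabetic letters of the ciphertext
def pvLetters (cs : List Char) : List Char :=
  (cs.filter (fun c => PySem.Chars.isalpha c)).map PySem.Chars.lowerChar

-- the common normal form of both frequency dictionaries
def pvFreq (rk : PySem.Dict String String) (cs : List Char) : PySem.Dict Char Int :=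
  PySem.Dict.counter ((pvLetters cs).flatMap (pvG rk))

-- ---------- ASCII character facts ----------

theorem pv_char_le_iff (a c : Char) : (a ≤ c) ↔ a.toNat ≤ c.toNat := by
  rw [Char.le_def, UInt32.le_iff_toNat_le]; rfl

theorem pv_toNat_ofNat (n : Nat) (h : n < 55296) : (Char.ofNat n).toNat = n := by
  have hv : Nat.isValidChar n := Or.inl h
  rw [Char.ofNat, dif_pos hv]
  simp [Char.ofNatAux, Char.toNat, UInt32.toNat, BitVec.toNat_ofNatLT]

theorem pv_islower_iff (c : Char) : PySem.Chars.islower c = true ↔ 97 ≤ c.toNat ∧ c.toNat ≤ 122 := by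
  simp [PySem.Chars.islower, pv_char_le_iff]

theorem pv_isupper_iff (c : Char) : PySem.Chars.isupper c = true ↔ 65 ≤ c.toNat ∧ c.toNat ≤ 90 := by
  simp [PySem.Chars.isupper, pv_char_le_iff]

theorem pv_isalpha_upperChar (c : Char) :
    PySem.Chars.isalpha (PySem.Chars.upperChar c) = PySem.Chars.isalpha c := by
  unfold PySem.Chars.upperChar
  by_cases h : PySem.Chars.islower c = true
  · have hc := (pv_islower_iff c).1 h
    have ht : (Char.ofNat (c.toNat - 32)).toNat = c.toNat - 32 := pv_toNat_ofNat _ (by omega)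
    have hu : PySem.Chars.isupper (Char.ofNat (c.toNat - 32)) = true := by
      rw [pv_isupper_iff, ht]; omega
    have hu' : PySem.Chars.isupper c = false := by
      rw [Bool.eq_false_iff]; intro hx; rw [pv_isupper_iff] at hx; omega
    simp [PySem.Chars.isalpha, h, hu, hu']
  · simp [h]

theorem pv_lowerChar_upperChar (c : Char) :
    PySem.Chars.lowerChar (PySem.Chars.upperChar c) = PySem.Chars.lowerChar c := by
  unfold PySem.Chars.upperChar
  by_cases h : PySem.Chars.islower c = true
  · have hc := (pv_islower_iff c).1 h
    have ht : (Char.ofNat (c.toNat - 32)).toNat = c.toNat - 32 := pv_toNat_ofNat _ (by omega)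
    have hu : PySem.Chars.isupper (Char.ofNat (c.toNat - 32)) = true := by
      rw [pv_isupper_iff, ht]; omega
    have hu' : PySem.Chars.isupper c = false := by
      rw [Bool.eq_false_iff]; intro hx; rw [pv_isupper_iff] at hx; omega
    simp only [h, if_true, PySem.Chars.lowerChar, hu, hu']
    rw [if_neg (by simp), ht]
    have h32 : c.toNat - 32 + 32 = c.toNat := by omega
    rw [h32]
    exact Char.ofNat_toNat c
  · simp [h]

theorem pv_lowerChar_of_not_isupper (c : Char) (h : PySem.Chars.isupper c = false) :
    PySem.Chars.lowerChar c = c := by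
  simp [PySem.Chars.lowerChar, h]

-- ---------- small list facts ----------

theorem pv_join_nil (L : List (List Char)) : PySem.Chars.join [] L = L.flatten := by
  unfold PySem.Chars.join
  induction L with
  | nil => rfl
  | cons a t ih =>
    cases t with
    | nil => simp [List.intercalate]
    | cons b u =>
      rw [List.intercalate] at *
      rw [List.intersperse_cons₂]
      simp only [List.flatten_cons] at *
      rw [ih]
      simp

theorem pv_flatMap_ite_nil {α β : Type} (cs : List α) (p : α → Bool) (h : α → List β) :
    cs.flatMap (fun c => if p c then h c else []) = (cs.filter p).flatMap h := by
  induction cs with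
  | nil => rfl
  | cons a t ih =>
    by_cases hp : p a = true <;> simp [hp, ih]

-- ---------- PySem.Set facts ----------

theorem pv_add_of_mem {s : PySem.Set Char} {x : Char} (h : x ∈ s) : s.add x = s := by
  simp [PySem.Set.add, h]

theorem pv_mem_update (s : PySem.Set Char) (l : List Char) (y : Char) :
    y ∈ PySem.Set.update s l ↔ y ∈ s ∨ y ∈ l := by
  induction l generalizing s with
  | nil => simp [PySem.Set.update]
  | cons a t ih =>
    show y ∈ PySem.Set.update (s.add a) t ↔ _
    rw [ih, PySem.Set.mem_add]
    simp [or_assoc]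

theorem pv_update_append (s : PySem.Set Char) (a b : List Char) :
    PySem.Set.update s (a ++ b) = PySem.Set.update (PySem.Set.update s a) b := by
  simp [PySem.Set.update, List.foldl_append]

theorem pv_update_absorb {s : PySem.Set Char} {l : List Char} (h : ∀ y ∈ l, y ∈ s) :
    PySem.Set.update s l = s := by
  induction l generalizing s with
  | nil => rfl
  | cons a t ih =>
    show PySem.Set.update (s.add a) t = s
    rw [pv_add_of_mem (h a (by simp))]
    exact ih (fun y hy => h y (by simp [hy]))

theorem pv_foldl_add_flatMap (g : Char → List Char) :
    ∀ (t seen s : List Char),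
    PySem.Set.update s ((t.foldl PySem.Set.add seen).flatMap g) =
    PySem.Set.update s ((seen ++ t).flatMap g) := by
  intro t
  induction t with
  | nil => intro seen s; simp
  | cons a t ih =>
    intro seen s
    show PySem.Set.update s ((t.foldl PySem.Set.add (PySem.Set.add seen a)).flatMap g) = _
    by_cases hmem : a ∈ seen
    · rw [pv_add_of_mem hmem, ih]
      have habs : PySem.Set.update (PySem.Set.update s (seen.flatMap g)) (g a)
          = PySem.Set.update s (seen.flatMap g) := by
        apply pv_update_absorb
        intro y hy
        rw [pv_mem_update]
        exact Or.inr (List.mem_flatMap.2 ⟨a, hmem, hy⟩)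
      rw [List.flatMap_append, pv_update_append]
      rw [show (seen ++ a :: t).flatMap g = seen.flatMap g ++ (g a ++ t.flatMap g) by
        simp [List.flatMap_append]]
      rw [pv_update_append, pv_update_append, habs]
    · have hadd : PySem.Set.add seen a = seen ++ [a] := by
        simp [PySem.Set.add, hmem]
      rw [hadd, ih]
      have h1 : seen ++ a :: t = (seen ++ [a]) ++ t := by simp
      rw [h1]

theorem pv_ofList_flatMap_ofList (g : Char → List Char) (xs : List Char) :
    PySem.Set.ofList ((PySem.Set.ofList xs).flatMap g) = PySem.Set.ofList (xs.flatMap g) := by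
  have h := pv_foldl_add_flatMap g xs [] []
  simpa [PySem.Set.ofList, PySem.Set.update, PySem.Set.empty] using h

-- ---------- dictionary-accumulation facts ----------

theorem pv_getD_inner (l : List Char) (d : PySem.Dict Char Int) (n : Int) (v : Char) :
    (l.foldl (fun d2 x => d2.insert x (d2.getD x 0 + n)) d).getD v 0 =
    d.getD v 0 + (l.count v : Int) * n := by
  induction l generalizing d with
  | nil => simp
  | cons a t ih =>
    show (t.foldl _ (d.insert a (d.getD a 0 + n))).getD v 0 = _
    rw [ih, PySem.Dict.getD_insert]
    by_cases hv : v = a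
    · subst hv; simp; ring
    · simp [hv, Ne.symm hv]

theorem pv_keys_outer (g : Char → List Char) (nfun : Char → Int) (ls : List Char)
    (d : PySem.Dict Char Int) :
    (ls.foldl (fun d l => (g l).foldl (fun d2 x => d2.insert x (d2.getD x 0 + nfun l)) d) d).keys =
    PySem.Set.update d.keys (ls.flatMap g) := by
  induction ls generalizing d with
  | nil => simp [PySem.Set.update]
  | cons a t ih =>
    show (t.foldl _ ((g a).foldl _ d)).keys = _
    rw [ih, PySem.Dict.keys_foldl_insert]
    rw [List.flatMap_cons, pv_update_append]

theorem pv_nodup_outer (g : Char → List Char) (nfun : Char → Int) (ls : List Char)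
    (d : PySem.Dict Char Int) (h : d.keys.Nodup) :
    (ls.foldl (fun d l => (g l).foldl (fun d2 x => d2.insert x (d2.getD x 0 + nfun l)) d) d).keys.Nodup := by
  induction ls generalizing d with
  | nil => exact h
  | cons a t ih =>
    exact ih _ (PySem.Dict.nodup_keys_foldl_insert _ _ _ h)

theorem pv_getD_outer (g : Char → List Char) (nfun : Char → Int) (ls : List Char)
    (d : PySem.Dict Char Int) (v : Char) :
    (ls.foldl (fun d l => (g l).foldl (fun d2 x => d2.insert x (d2.getD x 0 + nfun l)) d) d).getD v 0 =
    d.getD v 0 + (ls.map (fun l => ((g l).count v : Int) * nfun l)).sum := by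
  induction ls generalizing d with
  | nil => simp
  | cons a t ih =>
    show (t.foldl _ ((g a).foldl _ d)).getD v 0 = _
    rw [ih, pv_getD_inner]
    simp
    ring

theorem pv_sum_regroup (xs : List Char) (h : Char → Int) :
    ((PySem.Set.ofList xs).map (fun l => (xs.count l : Int) * h l)).sum = (xs.map h).sum := by
  rw [Finset.sum_list_map_count xs h]
  rw [← List.sum_toFinset _ (PySem.Set.nodup_ofList xs)]
  have hfin : (PySem.Set.ofList xs).toFinset = xs.toFinset := by
    ext a; simp [PySem.Set.mem_ofList]
  rw [hfin]
  apply Finset.sum_congr rfl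
  intro m _
  simp

-- the heart of the equivalence: Counter of the flattened decrypted stream
-- equals the distribute-counts-over-distinct-cipher-letters fold
theorem pv_main_dict (g : Char → List Char) (xs : List Char) :
    PySem.Dict.counter (xs.flatMap g) =
    (PySem.Set.ofList xs).foldl
      (fun d l => (g l).foldl (fun d2 x => d2.insert x (d2.getD x 0 + (xs.count l : Int))) d)
      PySem.Dict.empty := by
  apply PySem.Dict.ext
  have hk1 : (PySem.Dict.counter (xs.flatMap g)).keys = PySem.Set.ofList (xs.flatMap g) :=
    PySem.Dict.keys_counter _
  have hk2 :
      ((PySem.Set.ofList xs).foldl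
        (fun d l => (g l).foldl (fun d2 x => d2.insert x (d2.getD x 0 + (xs.count l : Int))) d)
        PySem.Dict.empty).keys = PySem.Set.ofList (xs.flatMap g) := by
    rw [pv_keys_outer g (fun l => (xs.count l : Int))]
    rw [PySem.Dict.keys_empty]
    show PySem.Set.update PySem.Set.empty _ = _
    rw [show (PySem.Set.update PySem.Set.empty ((PySem.Set.ofList xs).flatMap g)) =
        PySem.Set.ofList ((PySem.Set.ofList xs).flatMap g) from rfl]
    exact pv_ofList_flatMap_ofList g xs
  rw [PySem.Dict.items_eq_map_keys _ (PySem.Dict.nodup_keys_counter _) 0,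
      PySem.Dict.items_eq_map_keys _ (pv_nodup_outer _ _ _ _ (by simp)) 0]
  rw [hk1, hk2]
  apply List.map_congr_left
  intro v _
  have hgd : ∀ w, (PySem.Dict.counter (xs.flatMap g)).getD w 0 =
      ((PySem.Set.ofList xs).foldl
        (fun d l => (g l).foldl (fun d2 x => d2.insert x (d2.getD x 0 + (xs.count l : Int))) d)
        PySem.Dict.empty).getD w 0 := by
    intro w
    rw [PySem.Dict.getD_counter, pv_getD_outer]
    have : ∀ l : Char, ((g l).count w : Int) * (xs.count l : Int) =
        (xs.count l : Int) * (fun l => ((g l).count w : Int)) l := by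
      intro l; ring
    simp only [this]
    rw [pv_sum_regroup xs (fun l => ((g l).count w : Int))]
    rw [List.count_flatMap]
    simp
    rfl
  rw [hgd v]

-- ---------- the two frequency dictionaries coincide ----------

theorem pv_freqA (rk : PySem.Dict String String) (cs : List Char) :
    PySem.Dict.counter
      (((PySem.Str.join "" (cs.foldl (fun acc c =>
          if PySem.Chars.isalpha c then
            if PySem.Chars.isupper c then
              acc ++ [PySem.Str.upper (rk.getD (String.ofList [PySem.Chars.lowerChar c]) "*")]
            else
              acc ++ [rk.getD (String.ofList [c]) "*"]
          else
            acc ++ [String.ofList [c]]) [])).toList.filter (fun c => PySem.Chars.isalpha c)).map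
        PySem.Chars.lowerChar)
    = pvFreq rk cs := by
  have hd : cs.foldl (fun acc c =>
          if PySem.Chars.isalpha c then
            if PySem.Chars.isupper c then
              acc ++ [PySem.Str.upper (rk.getD (String.ofList [PySem.Chars.lowerChar c]) "*")]
            else
              acc ++ [rk.getD (String.ofList [c]) "*"]
          else
            acc ++ [String.ofList [c]]) []
      = cs.map (fun c =>
          if PySem.Chars.isalpha c then
            if PySem.Chars.isupper c then
              PySem.Str.upper (rk.getD (String.ofList [PySem.Chars.lowerChar c]) "*")
            else
              rk.getD (String.ofList [c]) "*"
          else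
            String.ofList [c]) := by
    rw [List.foldl_ext _ (fun acc c => acc ++ [(fun c =>
          if PySem.Chars.isalpha c then
            if PySem.Chars.isupper c then
              PySem.Str.upper (rk.getD (String.ofList [PySem.Chars.lowerChar c]) "*")
            else
              rk.getD (String.ofList [c]) "*"
          else
            String.ofList [c]) c]) [] (by intro acc c _; beta_reduce; split_ifs <;> rfl)]
    rw [PySem.List.foldl_append_singleton_eq_map]
    simp
  rw [hd, PySem.Str.toList_join]
  rw [show ("" : String).toList = [] from rfl]
  rw [pv_join_nil, ← List.flatMap_def]
  congr 1
  rw [List.flatMap_map, List.filter_flatMap, List.map_flatMap]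
  rw [show (fun a =>
        ((if PySem.Chars.isalpha a = true then
            if PySem.Chars.isupper a = true then
              PySem.Str.upper (rk.getD (String.ofList [PySem.Chars.lowerChar a]) "*")
            else rk.getD (String.ofList [a]) "*"
          else String.ofList [a]).toList.filter (fun c => PySem.Chars.isalpha c)).map
          PySem.Chars.lowerChar)
      = (fun a => if PySem.Chars.isalpha a then pvG rk (PySem.Chars.lowerChar a) else []) from
    funext (fun c => by
      by_cases halpha : PySem.Chars.isalpha c = true
      · rw [if_pos halpha, if_pos halpha]
        by_cases hup : PySem.Chars.isupper c = true
        · rw [if_pos hup, PySem.Str.toList_upper]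
          show (((rk.getD (String.ofList [PySem.Chars.lowerChar c]) "*").toList.map
              PySem.Chars.upperChar).filter (fun c => PySem.Chars.isalpha c)).map
              PySem.Chars.lowerChar = _
          rw [List.filter_map]
          rw [show ((fun c => PySem.Chars.isalpha c) ∘ PySem.Chars.upperChar)
              = (fun c => PySem.Chars.isalpha c) from funext pv_isalpha_upperChar]
          rw [List.map_map]
          rw [show (PySem.Chars.lowerChar ∘ PySem.Chars.upperChar) = PySem.Chars.lowerChar from
            funext pv_lowerChar_upperChar]
          rfl
        · rw [if_neg hup]
          unfold pvG
          rw [pv_lowerChar_of_not_isupper c (by simpa using hup)]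
      · rw [if_neg halpha, if_neg halpha, String.toList_ofList]
        simp [halpha])]
  rw [pv_flatMap_ite_nil cs (fun c => PySem.Chars.isalpha c)
      (fun a => pvG rk (PySem.Chars.lowerChar a))]
  rw [← List.flatMap_map PySem.Chars.lowerChar (pvG rk)]
  rfl

theorem pv_freqB (rk : PySem.Dict String String) (cs : List Char) :
    (PySem.Dict.counter ((cs.filter (fun c => PySem.Chars.isalpha c)).map PySem.Chars.lowerChar)).items.foldl
      (fun d p =>
        ((rk.getD (String.ofList [p.1]) "*").toList).foldl (fun d2 ch =>
          if PySem.Chars.isalpha ch then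
            d2.insert (PySem.Chars.lowerChar ch) (d2.getD (PySem.Chars.lowerChar ch) 0 + p.2)
          else d2) d)
      PySem.Dict.empty
    = pvFreq rk cs := by
  rw [show ((cs.filter (fun c => PySem.Chars.isalpha c)).map PySem.Chars.lowerChar) = pvLetters cs from rfl]
  rw [PySem.Dict.items_counter, List.foldl_map]
  unfold pvFreq
  rw [pv_main_dict (pvG rk) (pvLetters cs)]
  apply List.foldl_ext
  intro d k _
  unfold pvG
  rw [List.foldl_map, List.foldl_filter]

-- ---------- most_common vs sorted(key=-count) ----------

theorem pv_sorted_rev (l : List (Char × Int)) :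
    PySem.List.sorted l (fun p => p.2) true = PySem.List.sorted l (fun p => -p.2) false := by
  rw [PySem.List.sorted_rev_eq_foldl_insertBy, PySem.List.sorted_eq_foldl_insertBy]
  have hfun : (fun (a b : Char × Int) => decide (b.2 < a.2)) =
      (fun (a b : Char × Int) => decide (-a.2 < -b.2)) := by
    funext a b
    simp only [decide_eq_decide]
    omega
  rw [hfun]

-- ---------- the scoring loops agree ----------

theorem pv_score (cond : Char → Bool) (f : Int × Char → Int) (l : List Char) :
    (PySem.List.enumerate l 0).foldl
      (fun s p => if cond p.2 then s + (if p.1 < 10 then f p else 0) else s) 0 =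
    (PySem.List.enumerate (l.take 10) 0).foldl
      (fun s p => if cond p.2 then s + f p else s) 0 := by
  rw [List.foldl_ext _ (fun s p => s + if cond p.2 then (if p.1 < 10 then f p else 0) else 0) 0
      (by intro s p _; by_cases hc : cond p.2 <;> simp [hc])]
  rw [List.foldl_ext (l := PySem.List.enumerate (l.take 10))
      (fun s p => if cond p.2 then s + f p else s)
      (fun s p => s + if cond p.2 then f p else 0) 0
      (by intro s p _; by_cases hc : cond p.2 <;> simp [hc])]
  rw [PySem.List.foldl_add, PySem.List.foldl_add]
  have hsplit : PySem.List.enumerate l 0 =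
      PySem.List.enumerate (l.take 10) 0 ++
      PySem.List.enumerate (l.drop 10) (0 + (l.take 10).length) := by
    conv_lhs => rw [← List.take_append_drop 10 l]
    rw [PySem.List.enumerate_append]
  rw [hsplit, List.map_append, List.sum_append]
  have hzero : ((PySem.List.enumerate (l.drop 10) (0 + (l.take 10).length)).map
      (fun p => if cond p.2 then (if p.1 < 10 then f p else 0) else 0)).sum = 0 := by
    apply List.sum_eq_zero
    intro x hx
    rw [List.mem_map] at hx
    obtain ⟨p, hp, hpx⟩ := hx
    rw [PySem.List.mem_enumerate_iff] at hp
    obtain ⟨k, hk, hpk⟩ := hp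
    have hlen : (l.drop 10).length = l.length - 10 := List.length_drop
    have htake : (l.take 10).length = 10 := by
      rw [List.length_take]; omega
    have h10 : ¬ (p.1 < 10) := by
      subst hpk; simp only [htake]; push_cast; omega
    rw [← hpx, if_neg h10]
    by_cases hc : cond p.2 <;> simp [hc]
  rw [hzero, add_zero]
  congr 1
  congr 1
  apply List.map_congr_left
  intro p hp
  rw [PySem.List.mem_enumerate_iff] at hp
  obtain ⟨k, hk, hpk⟩ := hp
  have h10 : p.1 < 10 := by
    subst hpk
    have : (l.take 10).length ≤ 10 := by rw [List.length_take]; omega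
    push_cast
    omega
  rw [if_pos h10]

-- ---------- assembly ----------

theorem evaluate_key_frequency_eq_alt (key : List (String × String)) (ciphertext : String) :
    evaluate_key_frequency key ciphertext = evaluate_key_frequency_alt key ciphertext := by
  simp only [evaluate_key_frequency, evaluate_key_frequency_alt]
  rw [pv_freqA, pv_freqB, pv_sorted_rev]
  rw [PySem.List.slice_to _ (by norm_num)]
  rw [show ((10 : Int)).toNat = 10 from rfl]
  exact pv_score
    (fun ch => PySem.Str.isIn (String.ofList [ch]) "etaoinsrhdlucmfywgpbvkxqjz")
    (fun p => 10 - |p.1 - PySem.Str.find "etaoinsrhdlucmfywgpbvkxqjz" (String.ofList [p.2])|) _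

-- ===== VERDICT (by name: the statement is the Claim_ definition above) =====
theorem evaluate_key_frequency_spec : Claim_equal_evaluate_key_frequency := by
  intro key ciphertext _
  unfold Spec_evaluate_key_frequency
  exact evaluate_key_frequency_eq_alt key ciphertext
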